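-- pv_equiv track=rewrite | github.com/DorianPRJ7/IA-ChessQuito | ChessQuitto/chessQuitto_alpha_beta.py | calcul_bonus_reine_en_vie
-- ===== SOURCE A (Python) =====
-- def positions_pieces(jeu, couleur):
--     positions = []
--     for i in range(4):
--         for j in range(4):
--             piece=jeu[i][j]
--             if (piece!='.') and (piece[0]==couleur):
--                 positions+=[(i,j)]
--     return positions
--
-- def calcul_bonus_reine_en_vie(jeu, couleur_joueur):
--     allies=positions_pieces(jeu,couleur_joueur)
--     for allie in allies:
--         i=allie[0]
--         j=allie[1]
--         piece=jeu[i][j]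
--         if piece[1:]=='R':
--             return 5
--     return -5
-- ===== SOURCE B (Python) =====
-- def calcul_bonus_reine_en_vie(jeu, couleur_joueur):
--     for i in range(4):
--         for j in range(4):
--             piece = jeu[i][j]
--             if piece[:1] == couleur_joueur and piece[1:] == 'R':
--                 return 5
--     return -5
-- ===== Notes on version B (the rewrite author's own statement) =====
-- stated objective: simpler
-- what changed: B fuses A's two passes (build the list of all allied-piece positions, then re-scan that list for the queen) into one 4x4 scan with an early return and no intermediate list, matching the queen cell directly via piece[:1]/piece[1:].
import Mathlib
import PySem

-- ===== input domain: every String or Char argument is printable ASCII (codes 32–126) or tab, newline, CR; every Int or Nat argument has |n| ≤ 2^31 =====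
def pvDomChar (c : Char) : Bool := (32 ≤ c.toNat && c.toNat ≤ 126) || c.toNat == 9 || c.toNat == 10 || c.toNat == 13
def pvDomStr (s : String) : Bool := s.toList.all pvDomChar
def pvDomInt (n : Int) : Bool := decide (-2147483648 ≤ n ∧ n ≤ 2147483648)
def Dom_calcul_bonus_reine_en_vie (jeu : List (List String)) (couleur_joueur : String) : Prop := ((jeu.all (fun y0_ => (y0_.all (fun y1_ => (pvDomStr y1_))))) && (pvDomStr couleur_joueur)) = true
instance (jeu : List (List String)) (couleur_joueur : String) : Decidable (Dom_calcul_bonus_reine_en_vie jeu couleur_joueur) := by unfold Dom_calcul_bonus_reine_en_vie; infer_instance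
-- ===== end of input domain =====

-- ===== PORT A =====
-- B fuses A's two passes (collect all allied positions into a list, then scan that list for
-- the queen) into one early-exit 4x4 scan with no intermediate list; same return value
-- wherever A returns (Pre_ excludes exactly A's IndexError inputs).

-- jeu[i][j]; exact under Pre_ (both indices in range there); defaults only hit outside Pre_
def pvCellA (jeu : List (List String)) (i j : Int) : String :=
  PySem.List.pyGetD (PySem.List.pyGetD jeu i []) j ""

def positions_pieces (jeu : List (List String)) (couleur : String) : List (Int × Int) :=
  (PySem.List.pyRange 0 4 1).foldl (fun positions i =>
    (PySem.List.pyRange 0 4 1).foldl (fun positions j =>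
      -- piece[0] ported as pyGetD piece.toList 0 ' ' : exact whenever piece is nonempty (Pre_)
      if pvCellA jeu i j ≠ "." ∧
          couleur.toList = [PySem.List.pyGetD (pvCellA jeu i j).toList 0 ' '] then
        positions ++ [(i, j)]
      else positions) positions) []

def pvLoopA (jeu : List (List String)) : List (Int × Int) → Int
  | [] => -5
  | allie :: rest =>
    if PySem.List.slice (pvCellA jeu allie.1 allie.2).toList (some 1) none = ['R'] then 5
    else pvLoopA jeu rest

def calcul_bonus_reine_en_vie (jeu : List (List String)) (couleur_joueur : String) : Int :=
  pvLoopA jeu (positions_pieces jeu couleur_joueur)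

-- ===== PORT B =====
def calcul_bonus_reine_en_vie_alt (jeu : List (List String)) (couleur_joueur : String) : Int :=
  match (PySem.List.pyRange 0 4 1).findSome? (fun i =>
    (PySem.List.pyRange 0 4 1).findSome? (fun j =>
      if PySem.List.slice (pvCellA jeu i j).toList none (some 1) = couleur_joueur.toList ∧
          PySem.List.slice (pvCellA jeu i j).toList (some 1) none = ['R'] then
        some (5 : Int)
      else none)) with
  | some v => v
  | none => -5

-- ===== PRECONDITION & SPEC =====
-- Pre_ excludes exactly the inputs where A raises IndexError: fewer than 4 rows, a row among
-- the first 4 shorter than 4, or an empty-string cell in the scanned 4x4 area ('' != '.'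
-- makes A evaluate piece[0] on it).
def Pre_calcul_bonus_reine_en_vie (jeu : List (List String)) (couleur_joueur : String) : Prop :=
  4 ≤ jeu.length ∧ ∀ row ∈ jeu.take 4, 4 ≤ row.length ∧ ∀ p ∈ row.take 4, p ≠ ""
instance (jeu : List (List String)) (couleur_joueur : String) : Decidable (Pre_calcul_bonus_reine_en_vie jeu couleur_joueur) := by unfold Pre_calcul_bonus_reine_en_vie; infer_instance

def pvWitness_calcul_bonus_reine_en_vie : List (List String) × String :=
  ([["bR", ".", ".", "."], [".", ".", ".", "."], [".", ".", "nR", "."], [".", ".", ".", "."]], "b")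

def Spec_calcul_bonus_reine_en_vie (jeu : List (List String)) (couleur_joueur : String) (out : Int) : Prop := out = calcul_bonus_reine_en_vie_alt jeu couleur_joueur
instance (jeu : List (List String)) (couleur_joueur : String) (out : Int) : Decidable (Spec_calcul_bonus_reine_en_vie jeu couleur_joueur out) := by unfold Spec_calcul_bonus_reine_en_vie; infer_instance

-- ===== CLAIM (what is proved, stated in full; the proofs are below) =====
def Claim_equal_calcul_bonus_reine_en_vie : Prop := ∀ (jeu : List (List String)) (couleur_joueur : String), Dom_calcul_bonus_reine_en_vie jeu couleur_joueur → Pre_calcul_bonus_reine_en_vie jeu couleur_joueur → Spec_calcul_bonus_reine_en_vie jeu couleur_joueur (calcul_bonus_reine_en_vie jeu couleur_joueur)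


-- ===== LEMMAS AND PROOFS =====

-- loop shapes
theorem pv_foldl_appendIf {α β : Type} (P : α → Prop) [DecidablePred P] (f : α → β) :
    ∀ (l : List α) (acc : List β),
      l.foldl (fun pos x => if P x then pos ++ [f x] else pos) acc
        = acc ++ (l.filter (fun x => decide (P x))).map f := by
  intro l
  induction l with
  | nil => intro acc; simp
  | cons x xs ih =>
    intro acc
    by_cases h : P x <;> simp [List.foldl, h, ih]

theorem pv_foldl_append {α β : Type} (g : α → List β) :
    ∀ (l : List α) (acc : List β),
      l.foldl (fun pos x => pos ++ g x) acc = acc ++ l.flatMap g := by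
  intro l
  induction l with
  | nil => intro acc; simp
  | cons x xs ih => intro acc; simp [List.foldl, ih]

theorem pv_loopA_any (jeu : List (List String)) :
    ∀ l : List (Int × Int),
      pvLoopA jeu l =
        if l.any (fun pr =>
            decide (PySem.List.slice (pvCellA jeu pr.1 pr.2).toList (some 1) none = ['R']))
        then 5 else -5 := by
  intro l
  induction l with
  | nil => simp [pvLoopA]
  | cons x xs ih =>
    by_cases h : PySem.List.slice (pvCellA jeu x.1 x.2).toList (some 1) none = ['R']
    · simp [pvLoopA, h]
    · simp only [pvLoopA, List.any_cons]
      rw [if_neg h, ih]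
      simp only [decide_eq_false h, Bool.false_or]

theorem pv_findSome_any {α : Type} (P : α → Prop) [DecidablePred P] :
    ∀ l : List α,
      (l.findSome? (fun x => if P x then some (5 : Int) else none))
        = (if l.any (fun x => decide (P x)) then some 5 else none) := by
  intro l
  induction l with
  | nil => simp
  | cons x xs ih =>
    by_cases h : P x <;> simp [List.findSome?, h, ih]

theorem pv_any_congr {α : Type} {l : List α} {p q : α → Bool}
    (h : ∀ x ∈ l, p x = q x) : l.any p = l.any q := by
  induction l with
  | nil => rfl
  | cons x xs ih =>
    simp only [List.any_cons, h x List.mem_cons_self,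
      ih (fun y hy => h y (List.mem_cons_of_mem _ hy))]

-- per-cell condition equivalence, for a nonempty piece
theorem pv_cond_iff (piece couleur : String) (hne : piece ≠ "") :
    (decide (piece ≠ "." ∧ couleur.toList = [PySem.List.pyGetD piece.toList 0 ' ']) &&
       decide (PySem.List.slice piece.toList (some 1) none = ['R']))
    = decide (PySem.List.slice piece.toList none (some 1) = couleur.toList ∧
       PySem.List.slice piece.toList (some 1) none = ['R']) := by
  cases ht : piece.toList with
  | nil =>
    exact absurd (String.toList_injective (by simp [ht])) hne
  | cons ch rest =>
    have h2 : PySem.List.slice (ch :: rest) none (some 1) = [ch] := by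
      have h := PySem.List.slice_to (xs := ch :: rest) (b := 1) (by norm_num)
      simpa using h
    simp only [h2, PySem.List.slice_from_one, List.tail_cons,
      PySem.List.pyGetD_zero_cons]
    by_cases hr : rest = ['R']
    · subst hr
      have hdot : piece ≠ "." := by
        intro h
        rw [h] at ht
        have h' : (['.'] : List Char) = ch :: 'R' :: [] := by
          have : (".":String).toList = ['.'] := by decide
          rw [this] at ht
          exact ht
        simp at h'
      simp [hdot, eq_comm]
    · simp [hr]

theorem pv_cell_ne (jeu : List (List String)) (couleur : String)
    (hpre : Pre_calcul_bonus_reine_en_vie jeu couleur)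
    (i j : Int) (hi : i ∈ PySem.List.pyRange 0 4 1) (hj : j ∈ PySem.List.pyRange 0 4 1) :
    pvCellA jeu i j ≠ "" := by
  obtain ⟨hlen, hrows⟩ := hpre
  have hi' := PySem.List.mem_pyRange_one.mp hi
  have hj' := PySem.List.mem_pyRange_one.mp hj
  have hiN : i.toNat < jeu.length := by omega
  have hrow_mem : jeu[i.toNat] ∈ jeu.take 4 := by
    have h : (jeu.take 4)[i.toNat]'(by simp; omega) = jeu[i.toNat] := List.getElem_take
    rw [← h]; exact List.getElem_mem _
  obtain ⟨hrlen, hcells⟩ := hrows _ hrow_mem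
  have hjN : j.toNat < (jeu[i.toNat]).length := by omega
  have hcell_mem : (jeu[i.toNat])[j.toNat] ∈ (jeu[i.toNat]).take 4 := by
    have h : ((jeu[i.toNat]).take 4)[j.toNat]'(by simp; omega) = (jeu[i.toNat])[j.toNat] :=
      List.getElem_take
    rw [← h]; exact List.getElem_mem _
  have hne := hcells _ hcell_mem
  have e1 : PySem.List.pyGetD jeu i ([] : List String) = jeu[i.toNat] :=
    PySem.List.pyGetD_eq_getElem jeu [] (by omega) (by omega)
  have e2 : PySem.List.pyGetD (jeu[i.toNat]) j "" = (jeu[i.toNat])[j.toNat] :=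
    PySem.List.pyGetD_eq_getElem _ _ (by omega) (by omega)
  unfold pvCellA
  rw [e1, e2]
  exact hne

-- ===== VERDICT (by name: the statement is the Claim_ definition above) =====
theorem calcul_bonus_reine_en_vie_spec : Claim_equal_calcul_bonus_reine_en_vie := by
  intro jeu couleur _hdom hpre
  unfold Spec_calcul_bonus_reine_en_vie
  unfold calcul_bonus_reine_en_vie calcul_bonus_reine_en_vie_alt positions_pieces
  rw [show
      (fun positions i =>
        (PySem.List.pyRange 0 4 1).foldl (fun positions j =>
          if pvCellA jeu i j ≠ "." ∧
              couleur.toList = [PySem.List.pyGetD (pvCellA jeu i j).toList 0 ' '] then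
            positions ++ [(i, j)]
          else positions) positions)
      = (fun (positions : List (Int × Int)) (i : Int) =>
          positions ++ ((PySem.List.pyRange 0 4 1).filter (fun j =>
            decide (pvCellA jeu i j ≠ "." ∧
              couleur.toList = [PySem.List.pyGetD (pvCellA jeu i j).toList 0 ' ']))).map
            (fun j => (i, j)))
      from funext fun positions => funext fun i => pv_foldl_appendIf _ _ _ _]
  rw [pv_foldl_append, List.nil_append, pv_loopA_any]
  rw [show
      (fun i => (PySem.List.pyRange 0 4 1).findSome? (fun j =>
        if PySem.List.slice (pvCellA jeu i j).toList none (some 1) = couleur.toList ∧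
            PySem.List.slice (pvCellA jeu i j).toList (some 1) none = ['R'] then
          some (5 : Int)
        else none))
      = (fun i : Int =>
          if (PySem.List.pyRange 0 4 1).any (fun j =>
              decide (PySem.List.slice (pvCellA jeu i j).toList none (some 1) = couleur.toList ∧
                PySem.List.slice (pvCellA jeu i j).toList (some 1) none = ['R'])) then
            some (5 : Int)
          else none)
      from funext fun i => pv_findSome_any _ _]
  rw [pv_findSome_any
        (fun i : Int => ((PySem.List.pyRange 0 4 1).any (fun j =>
          decide (PySem.List.slice (pvCellA jeu i j).toList none (some 1) = couleur.toList ∧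
            PySem.List.slice (pvCellA jeu i j).toList (some 1) none = ['R']))) = true)]
  simp only [Bool.decide_coe, List.any_flatMap, List.any_map, List.any_filter,
    Function.comp_def]
  have hany : ((PySem.List.pyRange 0 4 1).any fun i =>
        (PySem.List.pyRange 0 4 1).any fun j =>
          decide (pvCellA jeu i j ≠ "." ∧
              couleur.toList = [PySem.List.pyGetD (pvCellA jeu i j).toList 0 ' ']) &&
            decide (PySem.List.slice (pvCellA jeu i j).toList (some 1) none = ['R']))
      = ((PySem.List.pyRange 0 4 1).any fun i =>
        (PySem.List.pyRange 0 4 1).any fun j =>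
          decide (PySem.List.slice (pvCellA jeu i j).toList none (some 1) = couleur.toList ∧
            PySem.List.slice (pvCellA jeu i j).toList (some 1) none = ['R'])) := by
    refine pv_any_congr (fun i hi => pv_any_congr (fun j hj => ?_))
    exact pv_cond_iff _ _ (pv_cell_ne jeu couleur hpre i j hi hj)
  rw [hany]
  split <;> rfl
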